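-- pv_equiv track=rewrite | github.com/pypi-data/pypi-mirror-371 | packages/balancer-maths/balancer_maths-0.1.1.tar.gz/balancer_maths-0.1.1/src/common/utils.py | _get_single_input_index
-- ===== SOURCE A (Python) =====
-- def _get_single_input_index(max_amounts_in):
--     length = len(max_amounts_in)
--     input_index = length
--
--     for i in range(length):
--         if max_amounts_in[i] != 0:
--             if input_index != length:
--                 raise ValueError("Multiple non-zero inputs for single token add")
--             input_index = i
--
--     if input_index >= length:
--         raise ValueError("All zero inputs for single token add")
--
--     return input_index
-- ===== SOURCE B (Python) =====
-- def _get_single_input_index(max_amounts_in):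
--     first = next((i for i, v in enumerate(max_amounts_in) if v != 0), None)
--     if first is None:
--         raise ValueError("All zero inputs for single token add")
--     last = len(max_amounts_in) - 1 - next(
--         i for i, v in enumerate(reversed(max_amounts_in)) if v != 0)
--     if first != last:
--         raise ValueError("Multiple non-zero inputs for single token add")
--     return first
-- ===== Notes on version B (the rewrite author's own statement) =====
-- stated objective: alternative
-- what changed: Replaces A's stateful single pass (running sentinel index with a mid-loop raise on a second hit) by a two-ended scan: find the first non-zero index from the front and the last non-zero index from the back, raise if none exists or the two differ, else return the front index.
import Mathlib
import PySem

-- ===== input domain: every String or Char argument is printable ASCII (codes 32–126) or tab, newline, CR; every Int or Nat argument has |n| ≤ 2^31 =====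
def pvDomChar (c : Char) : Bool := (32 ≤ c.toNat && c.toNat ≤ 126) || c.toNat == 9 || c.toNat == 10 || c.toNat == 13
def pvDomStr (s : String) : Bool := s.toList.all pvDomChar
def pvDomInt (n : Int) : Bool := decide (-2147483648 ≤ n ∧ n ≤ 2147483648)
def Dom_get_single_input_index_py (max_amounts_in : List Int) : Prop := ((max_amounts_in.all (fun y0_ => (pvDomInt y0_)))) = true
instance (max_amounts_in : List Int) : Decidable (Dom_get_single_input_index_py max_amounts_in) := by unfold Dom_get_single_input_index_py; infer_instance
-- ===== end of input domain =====

-- B replaces A's stateful single pass by a two-ended scan (first non-zero from the front,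
-- last non-zero from the back, equal ⇔ unique); equivalence is about the return value.

-- ===== PORT A =====
-- A's for-loop as structural recursion; `none` models a raise. State: position i,
-- input_index, len, exactly as in A.
def pvALoop (l : List Int) (i input_index len : Int) : Option Int :=
  match l with
  | [] => if input_index ≥ len then none else some input_index
  | v :: rest =>
    if v ≠ 0 then
      if input_index ≠ len then none
      else pvALoop rest (i + 1) i len
    else pvALoop rest (i + 1) input_index len

def get_single_input_index_py (max_amounts_in : List Int) : Int :=
  (pvALoop max_amounts_in 0 (max_amounts_in.length : Int) (max_amounts_in.length : Int)).getD 0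

-- ===== PORT B =====
-- B: first = next front non-zero index (None → raise "All zero inputs for single token add");
-- last = len - 1 - (first non-zero index of the reversed list); first ≠ last →
-- raise "Multiple non-zero inputs for single token add"; else return first.
-- The raising branches lie outside Pre_ below.
def get_single_input_index_py_alt (max_amounts_in : List Int) : Int :=
  match max_amounts_in.findIdx? (fun v => v ≠ 0) with
  | none => 0  -- raise "All zero inputs for single token add"
  | some first =>
    let last : Int :=
      (max_amounts_in.length : Int) - 1 -
        (max_amounts_in.reverse.findIdx (fun v => v ≠ 0) : Int)
    if (first : Int) ≠ last then 0  -- raise "Multiple non-zero inputs for single token add"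
    else (first : Int)

-- ===== PRECONDITION & SPEC =====
-- Pre_: exactly one non-zero entry; on every other input BOTH Pythons raise ValueError
-- (with identical messages), so nothing A returns on is excluded.
def Pre_get_single_input_index_py (max_amounts_in : List Int) : Prop :=
  (max_amounts_in.filter (fun v => v ≠ 0)).length = 1
instance (max_amounts_in : List Int) : Decidable (Pre_get_single_input_index_py max_amounts_in) := by
  unfold Pre_get_single_input_index_py; infer_instance

def pvWitness_get_single_input_index_py : List Int := [0, 5, 0]

def Spec_get_single_input_index_py (max_amounts_in : List Int) (out : Int) : Prop := out = get_single_input_index_py_alt max_amounts_in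
instance (max_amounts_in : List Int) (out : Int) : Decidable (Spec_get_single_input_index_py max_amounts_in out) := by unfold Spec_get_single_input_index_py; infer_instance

-- ===== CLAIM (what is proved, stated in full; the proofs are below) =====
def Claim_equal_get_single_input_index_py : Prop := ∀ (max_amounts_in : List Int), Dom_get_single_input_index_py max_amounts_in → Pre_get_single_input_index_py max_amounts_in → Spec_get_single_input_index_py max_amounts_in (get_single_input_index_py max_amounts_in)

-- ===== LEMMAS AND PROOFS =====

-- Once the unique non-zero has been consumed, A's loop carries input_index through.
theorem pvALoop_all_zero (l : List Int) (i idx len : Int)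
    (hz : ∀ v ∈ l, v = 0) (hlt : idx < len) :
    pvALoop l i idx len = some idx := by
  induction l generalizing i with
  | nil => simp [pvALoop]; omega
  | cons v rest ih =>
    have hv : v = 0 := hz v (by simp)
    simp [pvALoop, hv]
    exact ih _ (fun w hw => hz w (by simp [hw]))

-- If the head is the single non-zero value, the tail is all zero.
theorem filter_nil_of_len1 (v : Int) (rest : List Int) (hv : ¬ v = 0)
    (hone : (List.filter (fun v => decide (v ≠ 0)) (v :: rest)).length = 1) :
    ∀ w ∈ rest, w = 0 := by
  rw [List.filter_cons] at hone
  simp [hv] at hone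
  exact hone

-- A's loop in the fresh state returns the index of the unique non-zero value.
theorem pvALoop_fresh (l : List Int) (i len : Int)
    (hinv : i + (l.length : Int) = len)
    (hone : (l.filter (fun v => v ≠ 0)).length = 1) :
    pvALoop l i len len = some (i + ((l.findIdx (fun v => v ≠ 0) : Int))) := by
  induction l generalizing i with
  | nil => simp at hone
  | cons v rest ih =>
    by_cases hv : v = 0
    · have hone' : (rest.filter (fun v => decide (v ≠ 0))).length = 1 := by
        rw [List.filter_cons] at hone; simpa [hv] using hone
      have h := ih (i + 1) (by simp at hinv ⊢; omega) hone'
      simp [pvALoop, hv, h, List.findIdx_cons]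
      omega
    · have hall := filter_nil_of_len1 v rest hv hone
      have hilt : i < len := by simp at hinv; omega
      simp [pvALoop, hv, pvALoop_all_zero rest (i + 1) i len hall hilt, List.findIdx_cons]

-- findIdx over all-zero prefix ++ [v] is the prefix length.
theorem findIdx_zeros_append (zs : List Int) (v : Int) (hv : ¬ v = 0)
    (hz : ∀ w ∈ zs, w = 0) :
    (zs ++ [v]).findIdx (fun w => w ≠ 0) = zs.length := by
  induction zs with
  | nil => simp [List.findIdx_cons, hv]
  | cons z rest ih =>
    have hz0 : z = 0 := hz z (by simp)
    rw [List.cons_append, List.findIdx_cons]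
    simp only [hz0, ne_eq, not_true_eq_false, decide_false, cond_false]
    simpa using ih (fun w hw => hz w (by simp [hw]))

-- Under Pre_, there is a non-zero element.
theorem exists_nonzero (l : List Int)
    (hone : (l.filter (fun v => v ≠ 0)).length = 1) :
    ∃ w ∈ l, ¬ w = 0 := by
  obtain ⟨a, ha⟩ := List.length_eq_one_iff.mp hone
  have hm : a ∈ l.filter (fun v => decide (v ≠ 0)) := by rw [ha]; simp
  have h2 := List.mem_filter.mp hm
  exact ⟨a, h2.1, by simpa using h2.2⟩

-- Under Pre_, the back scan agrees with the front scan: len - 1 - findIdx(reverse) = findIdx.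
theorem back_eq_front (l : List Int)
    (hone : (l.filter (fun v => v ≠ 0)).length = 1) :
    ((l.reverse.findIdx (fun v => v ≠ 0) : Int))
      = (l.length : Int) - 1 - ((l.findIdx (fun v => v ≠ 0) : Int)) := by
  induction l with
  | nil => simp at hone
  | cons v rest ih =>
    by_cases hv : v = 0
    · have hone' : (rest.filter (fun v => decide (v ≠ 0))).length = 1 := by
        rw [List.filter_cons] at hone; simpa [hv] using hone
      -- reverse = rest.reverse ++ [0]; a non-zero exists in rest.reverse, so findIdx ignores the tail
      have hex : rest.reverse.findIdx (fun v => decide (v ≠ 0)) < rest.reverse.length := by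
        obtain ⟨w, hw, hw0⟩ := exists_nonzero rest hone'
        exact List.findIdx_lt_length_of_exists ⟨w, by simp [hw], by simp [hw0]⟩
      rw [List.reverse_cons, List.findIdx_append]
      simp only [hex, if_true]
      have h := ih hone'
      rw [List.length_reverse] at hex
      simp [List.findIdx_cons, hv] at h ⊢
      omega
    · have hall := filter_nil_of_len1 v rest hv hone
      have hz : ∀ w ∈ rest.reverse, w = 0 := by
        intro w hw; exact hall w (List.mem_reverse.mp hw)
      rw [List.reverse_cons, findIdx_zeros_append rest.reverse v hv hz]
      simp [List.findIdx_cons, hv]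

-- Under Pre_, the front scan succeeds with findIdx.
theorem findIdx?_of_one (l : List Int)
    (hone : (l.filter (fun v => v ≠ 0)).length = 1) :
    l.findIdx? (fun v => v ≠ 0) = some (l.findIdx (fun v => v ≠ 0)) := by
  have hlt : l.findIdx (fun v => decide (v ≠ 0)) < l.length := by
    obtain ⟨w, hw, hw0⟩ := exists_nonzero l hone
    exact List.findIdx_lt_length_of_exists ⟨w, hw, by simp [hw0]⟩
  exact List.findIdx?_eq_some_iff_findIdx_eq.mpr ⟨hlt, rfl⟩

-- ===== VERDICT (by name: the statement is the Claim_ definition above) =====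
theorem get_single_input_index_py_spec : Claim_equal_get_single_input_index_py := by
  intro xs _ hpre
  unfold Spec_get_single_input_index_py get_single_input_index_py get_single_input_index_py_alt
  rw [pvALoop_fresh xs 0 (xs.length : Int) (by simp) hpre]
  rw [findIdx?_of_one xs hpre, back_eq_front xs hpre]
  simp
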